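-- pv_equiv track=rewrite | github.com/scott-robbins/AGI | Mazes/imutils.py | sub2ind
-- ===== SOURCE A (Python) =====
-- def sub2ind(subs, dims):
--     """
--     Given a 2D Array's subscripts, return it's
--     flattened index
--     :param subs:
--     :param dims:
--     :return:
--     """
--     ii = 0
--     for y in range(dims[1]):
--         for x in range(dims[0]):
--             if subs[0] == x and subs[1] == y:
--                 return ii
--             ii += 1
--     return -1
-- ===== SOURCE B (Python) =====
-- def sub2ind(subs, dims):
--     """
--     Given a 2D Array's subscripts, return it's
--     flattened index
--     :param subs:
--     :param dims:
--     :return: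
--     """
--     w, h = dims[0], dims[1]
--     if h <= 0 or w <= 0:
--         return -1
--     x = subs[0]
--     if not (0 <= x < w):
--         return -1
--     y = subs[1]
--     if not (0 <= y < h):
--         return -1
--     return y * w + x
-- ===== Notes on version B (the rewrite author's own statement) =====
-- stated objective: faster
-- what changed: Replaces the nested row-by-row scan counting cells until the subscript matches with the closed-form formula y*dims[0]+x guarded by in-bounds checks (-1 otherwise).
import Mathlib
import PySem

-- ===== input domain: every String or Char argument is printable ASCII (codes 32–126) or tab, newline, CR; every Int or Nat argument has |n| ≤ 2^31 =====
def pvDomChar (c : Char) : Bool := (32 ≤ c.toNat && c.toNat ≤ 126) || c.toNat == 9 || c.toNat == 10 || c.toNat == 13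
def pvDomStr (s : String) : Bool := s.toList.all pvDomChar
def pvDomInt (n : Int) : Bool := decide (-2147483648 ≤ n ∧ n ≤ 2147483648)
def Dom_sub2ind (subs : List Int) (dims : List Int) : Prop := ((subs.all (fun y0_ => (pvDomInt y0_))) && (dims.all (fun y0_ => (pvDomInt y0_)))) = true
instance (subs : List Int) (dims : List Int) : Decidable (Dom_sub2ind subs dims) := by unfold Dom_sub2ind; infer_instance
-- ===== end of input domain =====

-- B replaces A's nested counting scan by the closed-form index y*dims[0]+x with bounds checks.

-- ===== PORT A =====
-- early return encoded with Sum: Sum.inl ii = "still counting", Sum.inr v = "returned v"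
def sub2indInner (subs : List Int) (w : Int) (y : Int) (ii : Int) : Sum Int Int :=
  (PySem.List.pyRange 0 w 1).foldl
    (fun acc x =>
      match acc with
      | Sum.inl ii => if subs.getD 0 0 = x ∧ subs.getD 1 0 = y then Sum.inr ii else Sum.inl (ii + 1)
      | r => r)
    (Sum.inl ii)

def sub2ind (subs : List Int) (dims : List Int) : Int :=
  let r := (PySem.List.pyRange 0 (dims.getD 1 0) 1).foldl
    (fun acc y =>
      match acc with
      | Sum.inl ii => sub2indInner subs (dims.getD 0 0) y ii
      | r => r)
    (Sum.inl 0)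
  match r with
  | Sum.inl _ => -1
  | Sum.inr v => v

-- ===== PORT B =====
def sub2ind_alt (subs : List Int) (dims : List Int) : Int :=
  let w := dims.getD 0 0
  let h := dims.getD 1 0
  if h ≤ 0 ∨ w ≤ 0 then -1
  else
    let x := subs.getD 0 0
    if ¬ (0 ≤ x ∧ x < w) then -1
    else
      let y := subs.getD 1 0
      if ¬ (0 ≤ y ∧ y < h) then -1
      else y * w + x

-- ===== PRECONDITION & SPEC =====
-- Pre_ excludes exactly the inputs on which Python A raises IndexError: dims shorter than 2,
-- or subs too short while the loops actually reach subs[0]/subs[1].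
def Pre_sub2ind (subs : List Int) (dims : List Int) : Prop :=
  2 ≤ dims.length ∧
  (0 < dims.getD 1 0 → 0 < dims.getD 0 0 →
    1 ≤ subs.length ∧ (0 ≤ subs.getD 0 0 ∧ subs.getD 0 0 < dims.getD 0 0 → 2 ≤ subs.length))
instance (subs : List Int) (dims : List Int) : Decidable (Pre_sub2ind subs dims) := by unfold Pre_sub2ind; infer_instance
def pvWitness_sub2ind : List Int × List Int := ([1, 2], [3, 4])

def Spec_sub2ind (subs : List Int) (dims : List Int) (out : Int) : Prop := out = sub2ind_alt subs dims
instance (subs : List Int) (dims : List Int) (out : Int) : Decidable (Spec_sub2ind subs dims out) := by unfold Spec_sub2ind; infer_instance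

-- ===== CLAIM =====
def Claim_equal_sub2ind : Prop := ∀ (subs : List Int) (dims : List Int), Dom_sub2ind subs dims → Pre_sub2ind subs dims → Spec_sub2ind subs dims (sub2ind subs dims)

-- ===== LEMMAS AND PROOFS =====

-- characterisation of the inner fold over the x-range 0..m-1
theorem inner_aux (subs : List Int) (y : Int) (m : Nat) : ∀ ii : Int,
    ((List.range m).map (fun k : Nat => (0:Int) + (k : Int))).foldl
      (fun acc x =>
        match acc with
        | Sum.inl ii => if subs.getD 0 0 = x ∧ subs.getD 1 0 = y then Sum.inr ii else Sum.inl (ii + 1)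
        | r => r)
      (Sum.inl ii)
    = if subs.getD 1 0 = y ∧ 0 ≤ subs.getD 0 0 ∧ subs.getD 0 0 < (m : Int) then
        Sum.inr (ii + subs.getD 0 0)
      else Sum.inl (ii + m) := by
  induction m with
  | zero =>
    intro ii
    simp only [List.range_zero, List.map_nil, List.foldl_nil]
    rw [if_neg (by push_cast; omega)]
    norm_num
  | succ n ihn =>
    intro ii
    rw [List.range_succ, List.map_append, List.foldl_append, ihn ii]
    by_cases hc : subs.getD 1 0 = y ∧ 0 ≤ subs.getD 0 0 ∧ subs.getD 0 0 < (n : Int)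
    · rw [if_pos hc, if_pos ⟨hc.1, hc.2.1, by push_cast; omega⟩]
      simp
    · rw [if_neg hc]
      by_cases hm : subs.getD 0 0 = (0:Int) + n ∧ subs.getD 1 0 = y
      · simp only [List.map_cons, List.map_nil, List.foldl_cons, List.foldl_nil, if_pos hm]
        rw [if_pos ⟨hm.2, by omega, by push_cast; omega⟩]
        have : subs.getD 0 0 = (n : Int) := by omega
        rw [this]
      · simp only [List.map_cons, List.map_nil, List.foldl_cons, List.foldl_nil, if_neg hm]
        rw [if_neg (by push_cast at hm ⊢; omega)]
        congr 1
        push_cast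
        ring

-- inner loop as a closed form
theorem sub2indInner_eq (subs : List Int) (w y ii : Int) :
    sub2indInner subs w y ii =
      if subs.getD 1 0 = y ∧ 0 ≤ subs.getD 0 0 ∧ subs.getD 0 0 < w then
        Sum.inr (ii + subs.getD 0 0)
      else Sum.inl (ii + max w 0) := by
  unfold sub2indInner
  rw [PySem.List.pyRange_one, inner_aux]
  by_cases hc : subs.getD 1 0 = y ∧ 0 ≤ subs.getD 0 0 ∧ subs.getD 0 0 < w
  · rw [if_pos ⟨hc.1, hc.2.1, by omega⟩, if_pos hc]
  · rw [if_neg (by push_cast at hc ⊢; omega), if_neg hc]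
    congr 1
    omega

-- characterisation of the outer fold over the y-range 0..m-1
theorem outer_aux (subs : List Int) (w : Int) (m : Nat) : ∀ ii : Int,
    ((List.range m).map (fun k : Nat => (0:Int) + (k : Int))).foldl
      (fun acc y =>
        match acc with
        | Sum.inl ii => sub2indInner subs w y ii
        | r => r)
      (Sum.inl ii)
    = if (0 ≤ subs.getD 1 0 ∧ subs.getD 1 0 < (m : Int)) ∧ 0 ≤ subs.getD 0 0 ∧ subs.getD 0 0 < w then
        Sum.inr (ii + subs.getD 1 0 * max w 0 + subs.getD 0 0)
      else Sum.inl (ii + m * max w 0) := by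
  induction m with
  | zero =>
    intro ii
    simp only [List.range_zero, List.map_nil, List.foldl_nil]
    rw [if_neg (by push_cast; omega)]
    norm_num
  | succ n ihn =>
    intro ii
    rw [List.range_succ, List.map_append, List.foldl_append, ihn ii]
    by_cases hc : (0 ≤ subs.getD 1 0 ∧ subs.getD 1 0 < (n : Int)) ∧ 0 ≤ subs.getD 0 0 ∧ subs.getD 0 0 < w
    · rw [if_pos hc, if_pos ⟨⟨hc.1.1, by push_cast; omega⟩, hc.2⟩]
      simp
    · rw [if_neg hc]
      simp only [List.map_cons, List.map_nil, List.foldl_cons, List.foldl_nil]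
      rw [sub2indInner_eq]
      by_cases hm : subs.getD 1 0 = (0:Int) + n ∧ 0 ≤ subs.getD 0 0 ∧ subs.getD 0 0 < w
      · rw [if_pos hm, if_pos ⟨⟨by omega, by push_cast; omega⟩, hm.2⟩]
        have h1 : subs.getD 1 0 = (n : Int) := by omega
        rw [h1]
      · rw [if_neg hm, if_neg (by push_cast at hm ⊢; omega)]
        congr 1
        push_cast
        ring

theorem sub2ind_spec : Claim_equal_sub2ind := by
  intro subs dims _ _
  unfold Spec_sub2ind sub2ind sub2ind_alt
  rw [PySem.List.pyRange_one, outer_aux]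
  by_cases hc : (0 ≤ subs.getD 1 0 ∧ subs.getD 1 0 < ((dims.getD 1 0 - 0).toNat : Int)) ∧
      0 ≤ subs.getD 0 0 ∧ subs.getD 0 0 < dims.getD 0 0
  · rw [if_pos hc]
    have hw : 0 < dims.getD 0 0 := by omega
    have hmax : max (dims.getD 0 0) 0 = dims.getD 0 0 := by omega
    rw [hmax]
    simp only
    rw [if_neg (by omega), if_neg (by omega), if_neg (by omega)]
    ring
  · rw [if_neg hc]
    simp only
    by_cases h1 : dims.getD 1 0 ≤ 0 ∨ dims.getD 0 0 ≤ 0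
    · rw [if_pos h1]
    · rw [if_neg h1]
      push_neg at h1
      by_cases h2 : ¬ (0 ≤ subs.getD 0 0 ∧ subs.getD 0 0 < dims.getD 0 0)
      · rw [if_pos h2]
      · rw [if_neg h2]
        push_neg at h2
        rw [if_pos (by push_cast at hc ⊢; omega)]
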